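-- pv_equiv track=rewrite | github.com/SSCT-Lab/NLPLego | gen_temp.py | convert_label
-- ===== SOURCE A (Python) =====
-- eng_punctuation = ["–", "—", ";", ",", ".", ":", "--", "--", "-"]
--
-- def convert_label(s_words, comp_label):
--     temp_words = []
--     temp_adjuncts = []
--     adjunct = ""
--     for i in range(len(comp_label)):
--         if comp_label[i] == 1:
--             temp_words.append(s_words[i])
--             if adjunct != "":
--                 temp_adjuncts.append(adjunct.strip().rstrip())
--                 adjunct = ""
--         else:
--             adjunct += s_words[i] + " "
--             if s_words[i] in eng_punctuation:
--                 temp_words.append(s_words[i])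
--             else:
--                 temp_words.append("0")
--
--     return temp_words, temp_adjuncts
-- ===== SOURCE B (Python) =====
-- eng_punctuation = ["–", "—", ";", ",", ".", ":", "--", "--", "-"]
--
-- def convert_label(s_words, comp_label):
--     # Run-based (manual groupby): advance over maximal runs of equal label-class
--     # instead of per-index state; a zero-run contributes one adjunct iff it is
--     # terminated by a label-1 position (a trailing zero-run is dropped).
--     n = len(comp_label)
--     words = [s_words[i] for i in range(n)]
--     temp_words = []
--     temp_adjuncts = []
--     i = 0
--     while i < n:
--         b = comp_label[i] == 1
--         j = i
--         while j < n and (comp_label[j] == 1) == b: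
--             j += 1
--         run = words[i:j]
--         if b:
--             temp_words.extend(run)
--         else:
--             temp_words.extend(w if w in eng_punctuation else "0" for w in run)
--             if j < n:
--                 temp_adjuncts.append("".join(w + " " for w in run).strip())
--         i = j
--     return temp_words, temp_adjuncts
-- ===== Notes on version B (the rewrite author's own statement) =====
-- stated objective: alternative
-- what changed: A is a per-index state machine threading a growing adjunct string through one loop; B is a manual groupby that jumps over maximal runs of equal label-class, emitting each run's tokens in one block and one adjunct per zero-run that is terminated by a label-1 position (trailing zero-runs dropped), with no per-index accumulator state.
import Mathlib
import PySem

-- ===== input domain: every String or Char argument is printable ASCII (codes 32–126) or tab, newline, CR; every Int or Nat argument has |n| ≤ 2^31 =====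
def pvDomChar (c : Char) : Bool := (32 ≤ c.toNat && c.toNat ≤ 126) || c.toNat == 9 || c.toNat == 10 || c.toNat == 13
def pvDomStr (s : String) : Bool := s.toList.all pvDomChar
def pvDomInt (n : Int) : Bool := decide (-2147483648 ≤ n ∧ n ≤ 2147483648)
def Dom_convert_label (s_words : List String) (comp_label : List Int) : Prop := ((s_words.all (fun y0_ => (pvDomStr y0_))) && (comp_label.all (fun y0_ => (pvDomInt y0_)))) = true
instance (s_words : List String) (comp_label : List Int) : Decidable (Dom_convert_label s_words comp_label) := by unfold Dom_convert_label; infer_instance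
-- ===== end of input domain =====

-- B replaces A's per-index state machine (growing adjunct string) by a manual groupby that
-- jumps over maximal runs of equal label-class (objective: alternative algorithm, same cost).
-- Neither program mutates its arguments; equivalence is about the returned pair.

-- ===== PORT A =====
def engPunct : List String := ["–", "—", ";", ",", ".", ":", "--", "--", "-"]

-- one iteration of A's for-loop; state = (temp_words, temp_adjuncts, adjunct)
def stepA (s_words : List String) (comp_label : List Int)
    (st : List String × List String × String) (i : Nat) : List String × List String × String :=
  let w := s_words.getD i ""          -- s_words[i]; in range under Pre_
  if comp_label.getD i 0 = 1 then
    let tw := st.1 ++ [w]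
    if st.2.2 ≠ "" then (tw, st.2.1 ++ [PySem.Str.rstrip (PySem.Str.strip st.2.2)], "")
    else (tw, st.2.1, st.2.2)
  else
    let adj := st.2.2 ++ w ++ " "
    if engPunct.contains w then (st.1 ++ [w], st.2.1, adj)
    else (st.1 ++ ["0"], st.2.1, adj)

def convert_label (s_words : List String) (comp_label : List Int) : List String × List String :=
  let st := (List.range comp_label.length).foldl (stepA s_words comp_label) ([], [], "")
  (st.1, st.2.1)

-- ===== PORT B =====
-- Source B: "".join(w + " " for w in run).strip()
def flushB (run : List String) : String :=
  PySem.Str.strip (PySem.Str.join "" (run.map (· ++ " ")))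

-- Source B inner while loop: smallest j ≥ start with j = n or (comp_label[j]==1) ≠ b;
-- fuel = n - start bounds the iterations exactly (each step needs j < n)
def runEndAux (lab : List Int) (b : Bool) : Nat → Nat → Nat
  | 0, j => j
  | f + 1, j => if j < lab.length ∧ ((lab.getD j 0 == 1) = b) then runEndAux lab b f (j + 1) else j

def runEnd (lab : List Int) (b : Bool) (j : Nat) : Nat :=
  runEndAux lab b (lab.length - j) j

theorem runEndAux_ge (lab : List Int) (b : Bool) :
    ∀ (f j : Nat), j ≤ runEndAux lab b f j := by
  intro f
  induction f with
  | zero => intro j; simp [runEndAux]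
  | succ f ih =>
    intro j
    simp only [runEndAux]
    split
    · exact Nat.le_trans (Nat.le_succ j) (ih (j + 1))
    · exact Nat.le_refl j

-- Source B outer while loop; advances run by run, fuelled by lab.length - i
theorem runEnd_self_lt (lab : List Int) (i : Nat) (h : i < lab.length) :
    i < runEnd lab (lab.getD i 0 == 1) i := by
  unfold runEnd
  have hf : lab.length - i = (lab.length - i - 1) + 1 := by omega
  rw [hf, runEndAux, if_pos ⟨h, rfl⟩]
  exact Nat.lt_of_lt_of_le (Nat.lt_succ_self i) (runEndAux_ge _ _ _ _)

def goB (words : List String) (lab : List Int) (i : Nat) : List String × List String :=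
  if h : i < lab.length then
    let b := lab.getD i 0 == 1
    let j := runEnd lab b i
    let run := (words.drop i).take (j - i)    -- words[i:j], with 0 ≤ i ≤ j
    have hj : i < j := runEnd_self_lt lab i h
    let rest := goB words lab j
    if b then (run ++ rest.1, rest.2)
    else ((run.map (fun w => if engPunct.contains w then w else "0")) ++ rest.1,
          (if j < lab.length then [flushB run] else []) ++ rest.2)
  else ([], [])
termination_by lab.length - i
decreasing_by
  exact Nat.sub_lt_sub_left h hj

def convert_label_alt (s_words : List String) (comp_label : List Int) : List String × List String :=
  let n := comp_label.length
  let words := (List.range n).map (fun i => s_words.getD i "")   -- [s_words[i] for i in range(n)]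
  goB words comp_label 0

-- ===== PRECONDITION & SPEC =====
-- Pre_ excludes exactly the inputs where Python A raises IndexError: s_words[i] for some i < len(comp_label).
def Pre_convert_label (s_words : List String) (comp_label : List Int) : Prop :=
  comp_label.length ≤ s_words.length
instance (s_words : List String) (comp_label : List Int) : Decidable (Pre_convert_label s_words comp_label) := by unfold Pre_convert_label; infer_instance

def pvWitness_convert_label : List String × List Int :=
  (["a", ";", "b", "c"], [0, 0, 1, 0])

def Spec_convert_label (s_words : List String) (comp_label : List Int) (out : List String × List String) : Prop := out = convert_label_alt s_words comp_label
instance (s_words : List String) (comp_label : List Int) (out : List String × List String) : Decidable (Spec_convert_label s_words comp_label out) := by unfold Spec_convert_label; infer_instance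

-- ===== CLAIM (what is proved, stated in full; the proofs are below) =====
def Claim_equal_convert_label : Prop := ∀ (s_words : List String) (comp_label : List Int), Dom_convert_label s_words comp_label → Pre_convert_label s_words comp_label → Spec_convert_label s_words comp_label (convert_label s_words comp_label)

-- ===== LEMMAS AND PROOFS =====

-- intermediate per-index description of both outputs (proof-only, used by the two bridges)
def wordB (s_words : List String) (comp_label : List Int) (i : Nat) : String :=
  let w := s_words.getD i ""
  if comp_label.getD i 0 = 1 ∨ engPunct.contains w then w else "0"

def stepB (s_words : List String) (comp_label : List Int)
    (st : List String × List String) (i : Nat) : List String × List String :=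
  if comp_label.getD i 0 = 1 then
    if st.2 ≠ [] then (st.1 ++ [flushB st.2], [])
    else st
  else (st.1, st.2 ++ [s_words.getD i ""])

def joinRun (run : List String) : String := PySem.Str.join "" (run.map (· ++ " "))

theorem joinRun_nil : joinRun [] = "" := rfl

theorem internil : ∀ (l : List (List Char)), [].intercalate l = l.flatten := by
  intro l
  induction l with
  | nil => rfl
  | cons a t ih =>
    cases t with
    | nil => simp [List.intercalate]
    | cons b u =>
      simp only [List.intercalate, List.intersperse] at *
      simp_all

theorem joinRun_append (run : List String) (w : String) :
    joinRun (run ++ [w]) = joinRun run ++ w ++ " " := by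
  apply String.ext
  simp [joinRun, PySem.Str.toList_join, PySem.Chars.join, internil]

theorem joinRun_eq_empty_iff (run : List String) : joinRun run = "" ↔ run = [] := by
  constructor
  · intro h
    cases run with
    | nil => rfl
    | cons a t =>
      exfalso
      have := congrArg String.toList h
      simp [joinRun, PySem.Str.toList_join, PySem.Chars.join, internil] at this
  · intro h; subst h; rfl

theorem rstrip_strip (s : String) : PySem.Str.rstrip (PySem.Str.strip s) = PySem.Str.strip s := by
  apply String.ext
  simp [PySem.Str.toList_rstrip, PySem.Str.toList_strip, PySem.Chars.strip, PySem.Chars.rstrip,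
    List.dropWhile_idempotent]

-- bridge 1: A's fold equals the per-index map plus the stepB fold
theorem main_inv (s_words : List String) (comp_label : List Int) (l : List Nat)
    (tw ta run : List String) :
    l.foldl (stepA s_words comp_label) (tw, ta, joinRun run) =
      (tw ++ l.map (wordB s_words comp_label),
       (l.foldl (stepB s_words comp_label) (ta, run)).1,
       joinRun (l.foldl (stepB s_words comp_label) (ta, run)).2) := by
  induction l generalizing tw ta run with
  | nil => simp
  | cons i t ih =>
    simp only [List.foldl_cons, List.map_cons]
    by_cases h : comp_label[i]?.getD 0 = 1
    · by_cases hr : run = []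
      · subst hr
        have e1 : stepA s_words comp_label (tw, ta, joinRun []) i
            = (tw ++ [s_words.getD i ""], ta, joinRun []) := by
          simp [stepA, h, joinRun_nil]
        have e2 : stepB s_words comp_label (ta, []) i = (ta, []) := by
          simp [stepB, h]
        rw [e1, e2, ih]
        simp [wordB, h]
      · have hne : joinRun run ≠ "" := by rw [Ne, joinRun_eq_empty_iff]; exact hr
        have e1 : stepA s_words comp_label (tw, ta, joinRun run) i
            = (tw ++ [s_words.getD i ""],
               ta ++ [PySem.Str.rstrip (PySem.Str.strip (joinRun run))], joinRun []) := by
          simp [stepA, h, hne, joinRun_nil]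
        have e2 : stepB s_words comp_label (ta, run) i = (ta ++ [flushB run], []) := by
          simp [stepB, h, hr]
        rw [e1, e2, rstrip_strip, show PySem.Str.strip (joinRun run) = flushB run from rfl, ih]
        simp [wordB, h]
    · have e2 : stepB s_words comp_label (ta, run) i = (ta, run ++ [s_words.getD i ""]) := by
        simp [stepB, h]
      by_cases hp : s_words[i]?.getD "" ∈ engPunct
      · have e1 : stepA s_words comp_label (tw, ta, joinRun run) i
            = (tw ++ [s_words.getD i ""], ta, joinRun (run ++ [s_words.getD i ""])) := by
          simp [stepA, h, hp, joinRun_append]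
        rw [e1, e2, ih]
        simp [wordB, h, hp]
      · have e1 : stepA s_words comp_label (tw, ta, joinRun run) i
            = (tw ++ ["0"], ta, joinRun (run ++ [s_words.getD i ""])) := by
          simp [stepA, h, hp, joinRun_append]
        rw [e1, e2, ih]
        simp [wordB, h, hp]

-- properties of the inner-while port runEnd
theorem runEndAux_le (lab : List Int) (b : Bool) :
    ∀ (f j : Nat), runEndAux lab b f j ≤ j + f := by
  intro f
  induction f with
  | zero => intro j; simp [runEndAux]
  | succ f ih =>
    intro j
    simp only [runEndAux]
    split
    · exact Nat.le_trans (ih (j + 1)) (by omega)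
    · omega

theorem runEnd_le (lab : List Int) (b : Bool) (j : Nat) (h : j ≤ lab.length) :
    runEnd lab b j ≤ lab.length := by
  have := runEndAux_le lab b (lab.length - j) j
  unfold runEnd
  omega

theorem runEndAux_mem (lab : List Int) (b : Bool) :
    ∀ (f j x : Nat), j ≤ x → x < runEndAux lab b f j → ((lab.getD x 0 == 1) = b) := by
  intro f
  induction f with
  | zero => intro j x h1 h2; simp [runEndAux] at h2; omega
  | succ f ih =>
    intro j x h1 h2
    simp only [runEndAux] at h2
    split at h2
    · rename_i hc
      rcases Nat.eq_or_lt_of_le h1 with rfl | hlt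
      · exact hc.2
      · exact ih (j + 1) x hlt h2
    · omega

theorem runEnd_mem (lab : List Int) (b : Bool) (j x : Nat)
    (h1 : j ≤ x) (h2 : x < runEnd lab b j) : ((lab.getD x 0 == 1) = b) :=
  runEndAux_mem lab b _ j x h1 h2

theorem runEndAux_stop (lab : List Int) (b : Bool) :
    ∀ (f j : Nat), lab.length ≤ j + f → runEndAux lab b f j < lab.length →
      ¬((lab.getD (runEndAux lab b f j) 0 == 1) = b) := by
  intro f
  induction f with
  | zero => intro j h1 h2; simp [runEndAux] at h2 ⊢; omega
  | succ f ih =>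
    intro j h1 h2
    simp only [runEndAux] at h2 ⊢
    split at h2
    · rename_i hc
      rw [if_pos hc]
      exact ih (j + 1) (by omega) h2
    · rename_i hc
      rw [if_neg hc]
      intro hbad
      exact hc ⟨h2, hbad⟩

theorem runEnd_stop (lab : List Int) (b : Bool) (j : Nat)
    (h : runEnd lab b j < lab.length) : ¬((lab.getD (runEnd lab b j) 0 == 1) = b) :=
  runEndAux_stop lab b _ j (by omega) h

theorem runEnd_eq_self (lab : List Int) (b : Bool) (j : Nat)
    (h : ¬((lab.getD j 0 == 1) = b)) : runEnd lab b j = j := by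
  unfold runEnd
  cases hf : lab.length - j with
  | zero => rfl
  | succ f => simp only [runEndAux]; rw [if_neg (by tauto)]

theorem runEnd_step (lab : List Int) (b : Bool) (j : Nat) (hj : j < lab.length)
    (hc : (lab.getD j 0 == 1) = b) : runEnd lab b j = runEnd lab b (j + 1) := by
  unfold runEnd
  have hf : lab.length - j = (lab.length - (j + 1)) + 1 := by omega
  rw [hf]
  simp only [runEndAux]
  rw [if_pos ⟨hj, hc⟩]

-- unfolding equations for goB
theorem goB_eq_one (words : List String) (lab : List Int) (i : Nat)
    (hi : i < lab.length) (hb : (lab.getD i 0 == 1) = true) :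
    goB words lab i =
      ((words.drop i).take (runEnd lab true i - i) ++ (goB words lab (runEnd lab true i)).1,
       (goB words lab (runEnd lab true i)).2) := by
  rw [goB, dif_pos hi]
  rw [if_pos hb, hb]

theorem goB_eq_zero (words : List String) (lab : List Int) (i : Nat)
    (hi : i < lab.length) (hb : (lab.getD i 0 == 1) = false) :
    goB words lab i =
      (((words.drop i).take (runEnd lab false i - i)).map
          (fun w => if engPunct.contains w then w else "0") ++ (goB words lab (runEnd lab false i)).1,
       (if runEnd lab false i < lab.length
          then [flushB ((words.drop i).take (runEnd lab false i - i))] else [])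
         ++ (goB words lab (runEnd lab false i)).2) := by
  rw [goB, dif_pos hi]
  rw [if_neg (by rw [hb]; exact Bool.false_ne_true), hb]

theorem goB_eq_stop (words : List String) (lab : List Int) (i : Nat)
    (hi : ¬ i < lab.length) : goB words lab i = ([], []) := by
  rw [goB, dif_neg hi]

-- a position carrying label 1 contributes nothing to the adjunct list
theorem goB_skip_one (words : List String) (lab : List Int) (j : Nat)
    (hlab : (lab.getD j 0 == 1) = true) :
    (goB words lab (j + 1)).2 = (goB words lab j).2 := by
  by_cases hj : j < lab.length
  · rw [goB_eq_one words lab j hj hlab]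
    have hk : runEnd lab true j = runEnd lab true (j + 1) := runEnd_step lab true j hj hlab
    rw [hk]
    by_cases hj1 : j + 1 < lab.length
    · cases hb' : (lab.getD (j + 1) 0 == 1) with
      | true => rw [goB_eq_one words lab (j + 1) hj1 hb']
      | false =>
        rw [runEnd_eq_self lab true (j + 1) (by rw [hb']; exact Bool.false_ne_true)]
    · have : runEnd lab true (j + 1) = j + 1 := by
        unfold runEnd
        have : lab.length - (j + 1) = 0 := by omega
        rw [this]; rfl
      rw [this]
  · rw [goB_eq_stop words lab j hj, goB_eq_stop words lab (j + 1) (by omega)]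

-- a contiguous index slice of a list, as a map over range'
theorem take_drop_eq_map_range' (l : List String) (d : String) :
    ∀ (m i : Nat), i + m ≤ l.length →
      (l.drop i).take m = (List.range' i m).map (fun x => l.getD x d) := by
  intro m
  induction m with
  | zero => intro i _; simp
  | succ m ih =>
    intro i h
    have hi : i < l.length := by omega
    rw [List.range'_succ, List.map_cons, List.drop_eq_getElem_cons hi, List.take_succ_cons,
      ← List.getD_eq_getElem l d hi, ih (i + 1) (by omega)]

theorem words_getD (s_words : List String) (n x : Nat) (hx : x < n) :
    ((List.range n).map (fun i => s_words.getD i "")).getD x "" = s_words.getD x "" := by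
  simp [List.getD, List.getElem?_map, List.getElem?_range, hx]

-- stepB over a block of label-1 indices with no pending run: identity
theorem fold_ones (s_words : List String) (lab : List Int) :
    ∀ (S : List Nat) (ta : List String), (∀ x ∈ S, lab.getD x 0 = 1) →
      S.foldl (stepB s_words lab) (ta, []) = (ta, []) := by
  intro S
  induction S with
  | nil => intro ta _; rfl
  | cons x t ih =>
    intro ta h
    have hx : lab.getD x 0 = 1 := h x (by simp)
    have : stepB s_words lab (ta, []) x = (ta, []) := by simp [stepB, List.getD] at hx ⊢; simp [hx]
    rw [List.foldl_cons, this, ih ta (fun y hy => h y (by simp [hy]))]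

-- stepB over a block of non-1 indices: the words are appended to the pending run
theorem fold_zeros (s_words : List String) (lab : List Int) :
    ∀ (S : List Nat) (ta r : List String), (∀ x ∈ S, ¬ lab.getD x 0 = 1) →
      S.foldl (stepB s_words lab) (ta, r) = (ta, r ++ S.map (fun x => s_words.getD x "")) := by
  intro S
  induction S with
  | nil => intro ta r _; simp
  | cons x t ih =>
    intro ta r h
    have hx : ¬ lab.getD x 0 = 1 := h x (by simp)
    have : stepB s_words lab (ta, r) x = (ta, r ++ [s_words.getD x ""]) := by
      simp [stepB, List.getD] at hx ⊢; simp [hx]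
    rw [List.foldl_cons, this, ih ta _ (fun y hy => h y (by simp [hy]))]
    simp

-- the main bridge: per-index description = run-based goB, by induction on remaining length
theorem bridge (s_words words : List String) (lab : List Int)
    (hlen : lab.length ≤ words.length)
    (hw : ∀ x, x < lab.length → words.getD x "" = s_words.getD x "") :
    ∀ (f i : Nat), lab.length - i ≤ f →
      ((List.range' i (lab.length - i)).map (wordB s_words lab) = (goB words lab i).1)
      ∧ ∀ ta, ((List.range' i (lab.length - i)).foldl (stepB s_words lab) (ta, [])).1
          = ta ++ (goB words lab i).2 := by
  intro f
  induction f with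
  | zero =>
    intro i h
    have hi : ¬ i < lab.length := by omega
    rw [show lab.length - i = 0 by omega, goB_eq_stop words lab i hi]
    exact ⟨by simp, fun ta => by simp⟩
  | succ f ih =>
    intro i h
    by_cases hi : i < lab.length
    · cases hb : (lab.getD i 0 == 1) with
      | true =>
        have hij : i < runEnd lab true i := by
          have := runEnd_self_lt lab i hi; rwa [hb] at this
        have hjle : runEnd lab true i ≤ lab.length := runEnd_le lab true i (by omega)
        have hsplit : List.range' i (lab.length - i)
            = List.range' i (runEnd lab true i - i)
              ++ List.range' (runEnd lab true i) (lab.length - runEnd lab true i) := by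
          have h0 := @List.range'_append_1 i (runEnd lab true i - i) (lab.length - runEnd lab true i)
          rw [show i + (runEnd lab true i - i) = runEnd lab true i by omega,
            show (runEnd lab true i - i) + (lab.length - runEnd lab true i) = lab.length - i
              by omega] at h0
          exact h0.symm
        have hmem : ∀ x ∈ List.range' i (runEnd lab true i - i), lab.getD x 0 = 1 := by
          intro x hx
          rw [List.mem_range'_1] at hx
          have := runEnd_mem lab true i x hx.1 (by omega)
          simpa using this
        have hrun : (words.drop i).take (runEnd lab true i - i)
            = (List.range' i (runEnd lab true i - i)).map (fun x => s_words.getD x "") := by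
          rw [take_drop_eq_map_range' words "" (runEnd lab true i - i) i (by omega)]
          apply List.map_congr_left
          intro x hx
          rw [List.mem_range'_1] at hx
          exact hw x (by omega)
        have hseg : (List.range' i (runEnd lab true i - i)).map (wordB s_words lab)
            = (words.drop i).take (runEnd lab true i - i) := by
          rw [hrun]
          apply List.map_congr_left
          intro x hx
          have h1 : lab[x]?.getD 0 = 1 := hmem x hx
          simp [wordB, h1]
        have ihj := ih (runEnd lab true i) (by omega)
        constructor
        · rw [hsplit, List.map_append, hseg, ihj.1, goB_eq_one words lab i hi hb]
        · intro ta
          rw [hsplit, List.foldl_append,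
            fold_ones s_words lab _ ta (fun x hx => hmem x hx),
            goB_eq_one words lab i hi hb]
          exact ihj.2 ta
      | false =>
        have hij : i < runEnd lab false i := by
          have := runEnd_self_lt lab i hi; rwa [hb] at this
        have hjle : runEnd lab false i ≤ lab.length := runEnd_le lab false i (by omega)
        have hsplit : List.range' i (lab.length - i)
            = List.range' i (runEnd lab false i - i)
              ++ List.range' (runEnd lab false i) (lab.length - runEnd lab false i) := by
          have h0 := @List.range'_append_1 i (runEnd lab false i - i) (lab.length - runEnd lab false i)
          rw [show i + (runEnd lab false i - i) = runEnd lab false i by omega,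
            show (runEnd lab false i - i) + (lab.length - runEnd lab false i) = lab.length - i
              by omega] at h0
          exact h0.symm
        have hmem : ∀ x ∈ List.range' i (runEnd lab false i - i), ¬ lab.getD x 0 = 1 := by
          intro x hx
          rw [List.mem_range'_1] at hx
          have := runEnd_mem lab false i x hx.1 (by omega)
          simpa using this
        have hrun : (words.drop i).take (runEnd lab false i - i)
            = (List.range' i (runEnd lab false i - i)).map (fun x => s_words.getD x "") := by
          rw [take_drop_eq_map_range' words "" (runEnd lab false i - i) i (by omega)]
          apply List.map_congr_left
          intro x hx
          rw [List.mem_range'_1] at hx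
          exact hw x (by omega)
        have hseg : (List.range' i (runEnd lab false i - i)).map (wordB s_words lab)
            = ((words.drop i).take (runEnd lab false i - i)).map
                (fun w => if engPunct.contains w then w else "0") := by
          rw [hrun, List.map_map]
          apply List.map_congr_left
          intro x hx
          have h1 : ¬ lab[x]?.getD 0 = 1 := hmem x hx
          simp [wordB, h1]
        constructor
        · rw [hsplit, List.map_append, hseg,
            (ih (runEnd lab false i) (by omega)).1, goB_eq_zero words lab i hi hb]
        · intro ta
          rw [hsplit, List.foldl_append, fold_zeros s_words lab _ ta [] hmem, List.nil_append]
          by_cases hjn : runEnd lab false i < lab.length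
          · have hone : (lab.getD (runEnd lab false i) 0 == 1) = true := by
              have h1 := runEnd_stop lab false i hjn
              cases hbb : (lab.getD (runEnd lab false i) 0 == 1) with
              | true => rfl
              | false => exact absurd hbb h1
            have hone' : lab.getD (runEnd lab false i) 0 = 1 := by simpa using hone
            have hrange : List.range' (runEnd lab false i) (lab.length - runEnd lab false i)
                = runEnd lab false i
                  :: List.range' (runEnd lab false i + 1) (lab.length - (runEnd lab false i + 1)) := by
              rw [show lab.length - runEnd lab false i = (lab.length - (runEnd lab false i + 1)) + 1
                by omega, List.range'_succ]
            have hne : (List.range' i (runEnd lab false i - i)).map (fun x => s_words.getD x "")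
                ≠ [] := by
              intro hE
              have := congrArg List.length hE
              simp [List.length_range'] at this
              omega
            have hstep : stepB s_words lab
                (ta, (List.range' i (runEnd lab false i - i)).map (fun x => s_words.getD x ""))
                (runEnd lab false i)
                = (ta ++ [flushB ((List.range' i (runEnd lab false i - i)).map
                    (fun x => s_words.getD x ""))], []) := by
              have h2 : lab[runEnd lab false i]?.getD 0 = 1 := hone'
              simp [stepB, h2, show runEnd lab false i - i ≠ 0 by omega]
            rw [hrange, List.foldl_cons, hstep,
              (ih (runEnd lab false i + 1) (by omega)).2 _,
              goB_skip_one words lab (runEnd lab false i) hone,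
              goB_eq_zero words lab i hi hb, if_pos hjn, hrun]
            simp
          · rw [show lab.length - runEnd lab false i = 0 by omega]
            rw [goB_eq_zero words lab i hi hb, if_neg hjn,
              goB_eq_stop words lab (runEnd lab false i) hjn]
            simp
    · have h0 : lab.length - i = 0 := by omega
      rw [h0, goB_eq_stop words lab i hi]
      exact ⟨by simp, fun ta => by simp⟩

-- ===== VERDICT (by name: the statement is the Claim_ definition above) =====
theorem convert_label_spec : Claim_equal_convert_label := by
  intro s_words comp_label _ _
  unfold Spec_convert_label convert_label convert_label_alt
  have h := main_inv s_words comp_label (List.range comp_label.length) [] [] []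
  simp only [joinRun_nil] at h
  rw [h]
  have hb := bridge s_words ((List.range comp_label.length).map (fun i => s_words.getD i ""))
    comp_label (by simp) (fun x hx => words_getD s_words comp_label.length x hx)
    comp_label.length 0 (by omega)
  simp only [Nat.sub_zero, ← List.range_eq_range'] at hb
  rw [Prod.mk.injEq]
  exact ⟨hb.1, hb.2 []⟩
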